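-- pv_equiv track=rewrite | github.com/Fordcois/AdventOfCode | 2015/Day06/aoc201506Part01.py | list_of_impacted_squares
-- ===== SOURCE A (Python) =====
-- def list_of_impacted_squares(tuple_one,tuple2):
--     a_y,a_x = tuple_one
--     b_y,b_x = tuple2
--     output=[]
--     for y in range ((b_y-a_y)+1):
--         for x in range ((b_x-a_x)+1):
--             output.append([(a_y + y),(a_x + x)])
--     return output
-- ===== SOURCE B (Python) =====
-- def list_of_impacted_squares(tuple_one, tuple2):
--     a_y, a_x = tuple_one
--     b_y, b_x = tuple2
--     h = (b_y - a_y) + 1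
--     w = (b_x - a_x) + 1
--     if h <= 0 or w <= 0:
--         return []
--     return [[a_y + i // w, a_x + i % w] for i in range(h * w)]
-- ===== Notes on version B (the rewrite author's own statement) =====
-- stated objective: alternative
-- what changed: Replaces the two nested y/x loops with a single linear pass over range(h*w) that recovers each coordinate pair arithmetically via divmod, guarding empty rectangles explicitly.
import Mathlib
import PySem

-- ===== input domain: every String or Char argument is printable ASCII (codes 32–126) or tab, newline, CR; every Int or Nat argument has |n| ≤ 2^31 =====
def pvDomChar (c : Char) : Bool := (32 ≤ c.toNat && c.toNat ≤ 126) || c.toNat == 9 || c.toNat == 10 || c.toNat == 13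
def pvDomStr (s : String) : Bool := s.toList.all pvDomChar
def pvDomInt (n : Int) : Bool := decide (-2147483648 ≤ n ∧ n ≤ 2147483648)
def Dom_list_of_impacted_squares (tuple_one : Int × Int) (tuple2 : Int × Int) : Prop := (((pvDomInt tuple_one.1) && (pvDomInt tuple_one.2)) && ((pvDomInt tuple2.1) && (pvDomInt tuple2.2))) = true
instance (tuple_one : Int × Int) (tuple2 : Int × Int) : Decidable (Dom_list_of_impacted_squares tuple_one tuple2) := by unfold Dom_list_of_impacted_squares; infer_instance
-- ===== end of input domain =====

-- B replaces A's two nested loops by one linear pass over range(h*w) decoding each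
-- coordinate with divmod (alternative decomposition; same asymptotic cost).

-- ===== PORT A =====
def list_of_impacted_squares (tuple_one : Int × Int) (tuple2 : Int × Int) : List (List Int) :=
  let a_y := tuple_one.1
  let a_x := tuple_one.2
  let b_y := tuple2.1
  let b_x := tuple2.2
  (PySem.List.pyRange 0 ((b_y - a_y) + 1) 1).foldl
    (fun output y =>
      (PySem.List.pyRange 0 ((b_x - a_x) + 1) 1).foldl
        (fun output x => output ++ [[a_y + y, a_x + x]]) output)
    []

-- ===== PORT B =====
def list_of_impacted_squares_alt (tuple_one : Int × Int) (tuple2 : Int × Int) : List (List Int) :=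
  let a_y := tuple_one.1
  let a_x := tuple_one.2
  let b_y := tuple2.1
  let b_x := tuple2.2
  let h := (b_y - a_y) + 1
  let w := (b_x - a_x) + 1
  if h ≤ 0 ∨ w ≤ 0 then []
  else
    (PySem.List.pyRange 0 (h * w) 1).map
      (fun i => [a_y + PySem.Int.floordiv i w, a_x + PySem.Int.mod i w])

-- ===== PRECONDITION & SPEC =====
def Spec_list_of_impacted_squares (tuple_one : Int × Int) (tuple2 : Int × Int) (out : List (List Int)) : Prop := out = list_of_impacted_squares_alt tuple_one tuple2
instance (tuple_one : Int × Int) (tuple2 : Int × Int) (out : List (List Int)) : Decidable (Spec_list_of_impacted_squares tuple_one tuple2 out) := by unfold Spec_list_of_impacted_squares; infer_instance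

-- ===== CLAIM (what is proved, stated in full; the proofs are below) =====
def Claim_equal_list_of_impacted_squares : Prop := ∀ (tuple_one : Int × Int) (tuple2 : Int × Int), Dom_list_of_impacted_squares tuple_one tuple2 → Spec_list_of_impacted_squares tuple_one tuple2 (list_of_impacted_squares tuple_one tuple2)

-- ===== LEMMAS AND PROOFS =====

-- Flattening a grid: nested range H × range W equals a single range (H*W) decoded by divmod.
theorem flatMap_range_eq_divmod {γ : Type} (H W : Nat) (hW : 0 < W) (F : Nat → Nat → γ) :
    (List.range H).flatMap (fun y => (List.range W).map (fun x => F y x))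
      = (List.range (H * W)).map (fun i => F (i / W) (i % W)) := by
  induction H with
  | zero => simp
  | succ H ih =>
    rw [List.range_succ, List.flatMap_append, ih, Nat.succ_mul, List.range_add,
      List.map_append]
    congr 1
    · simp only [List.flatMap_singleton, List.map_map]
      refine List.map_congr_left (fun x hx => ?_)
      have hxW : x < W := List.mem_range.mp hx
      have h1 : (H * W + x) / W = H := by
        rw [Nat.add_comm, Nat.add_mul_div_right _ _ hW, Nat.div_eq_of_lt hxW, Nat.zero_add]
      have h2 : (H * W + x) % W = x := by
        rw [Nat.add_comm, Nat.add_mul_mod_self_right, Nat.mod_eq_of_lt hxW]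
      simp [h1, h2]

theorem list_of_impacted_squares_eq (tuple_one tuple2 : Int × Int) :
    list_of_impacted_squares tuple_one tuple2 = list_of_impacted_squares_alt tuple_one tuple2 := by
  obtain ⟨a_y, a_x⟩ := tuple_one
  obtain ⟨b_y, b_x⟩ := tuple2
  simp only [list_of_impacted_squares, list_of_impacted_squares_alt]
  set h : Int := (b_y - a_y) + 1 with hh
  set w : Int := (b_x - a_x) + 1 with hw
  by_cases hcase : h ≤ 0 ∨ w ≤ 0
  · rw [if_pos hcase]
    rcases hcase with hle | hle
    · rw [PySem.List.pyRange_one_eq_nil (by omega : h ≤ 0)]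
      simp
    · rw [PySem.List.pyRange_one_eq_nil (by omega : w ≤ 0)]
      simp [List.foldl_fixed]
  · rw [if_neg hcase]
    rw [not_or] at hcase
    simp only [not_le] at hcase
    obtain ⟨hhpos, hwpos⟩ := hcase
    -- turn the nested foldls into a flatMap of maps
    have hfun : (fun (output : List (List Int)) (y : Int) =>
        List.foldl (fun output x => output ++ [[a_y + y, a_x + x]]) output
          (PySem.List.pyRange 0 w 1))
        = fun output y =>
            output ++ (PySem.List.pyRange 0 w 1).map (fun x => [a_y + y, a_x + x]) := by
      funext output y
      exact PySem.List.foldl_append_singleton_eq_map _ _ _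
    rw [hfun, PySem.List.foldl_append_eq_flatMap
      (fun y => (PySem.List.pyRange 0 w 1).map (fun x => [a_y + y, a_x + x]))]
    -- express everything over Nat ranges
    set H : Nat := h.toNat with hH
    set W : Nat := w.toNat with hW
    have hhn : h = (H : Int) := (Int.toNat_of_nonneg (by omega)).symm
    have hwn : w = (W : Int) := (Int.toNat_of_nonneg (by omega)).symm
    have hWpos : 0 < W := by omega
    have hhw : h * w = ((H * W : Nat) : Int) := by rw [hhn, hwn]; push_cast; ring
    rw [hhw, hhn, hwn, PySem.List.pyRange_one, PySem.List.pyRange_one, PySem.List.pyRange_one]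
    simp only [Int.sub_zero, Int.toNat_natCast, Int.zero_add, List.flatMap_def,
      List.map_map, List.nil_append]
    rw [← List.flatMap_def]
    simp only [Function.comp_def]
    rw [flatMap_range_eq_divmod H W hWpos
      (fun y x => [a_y + (y : Int), a_x + (x : Int)])]
    refine List.map_congr_left (fun i _ => ?_)
    simp [PySem.Int.floordiv_natCast, PySem.Int.mod_natCast]

-- ===== VERDICT (by name: the statement is the Claim_ definition above) =====
theorem list_of_impacted_squares_spec : Claim_equal_list_of_impacted_squares := by
  intro tuple_one tuple2 _
  exact list_of_impacted_squares_eq tuple_one tuple2
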